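-- pv_equiv track=rewrite | github.com/q13124/VoiceStudio | backend/api/security/route_security.py | is_sensitive_operation
-- ===== SOURCE A (Python) =====
-- SENSITIVE_OPERATIONS: set[str] = {
--     "POST /api/voice/clone",
--     "DELETE /api/profiles",
--     "DELETE /api/projects",
--     "POST /api/training/start",
--     "POST /api/training/export",
--     "POST /api/training/import",
-- }
--
-- def is_sensitive_operation(method: str, path: str) -> bool:
--     """
--     Check if a specific operation is marked as sensitive.
--
--     Args:
--         method: HTTP method (GET, POST, etc.)
--         path: Request path
--
--     Returns:
--         True if the operation requires special security consideration
--     """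
--     operation = f"{method.upper()} {path}"
--
--     # Check exact match
--     if operation in SENSITIVE_OPERATIONS:
--         return True
--
--     # Check prefix matches for sensitive operations
--     for sensitive_op in SENSITIVE_OPERATIONS:
--         op_method, op_path = sensitive_op.split(" ", 1)
--         if method.upper() == op_method and path.startswith(op_path):
--             return True
--
--     return False
-- ===== SOURCE B (Python) =====
-- SENSITIVE_PREFIXES = {
--     "POST": ["/api/voice/clone", "/api/training/start", "/api/training/export", "/api/training/import"],
--     "DELETE": ["/api/profiles", "/api/projects"],
-- }
--
-- def is_sensitive_operation(method: str, path: str) -> bool: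
--     prefixes = SENSITIVE_PREFIXES.get(method.upper())
--     if prefixes is None:
--         return False
--     return any(path.startswith(p) for p in prefixes)
-- ===== Notes on version B (the rewrite author's own statement) =====
-- stated objective: simpler
-- what changed: Replaced the exact-match set test plus a scan that splits every one of the six 'METHOD path' strings on each call by a precomputed method-keyed dict of path prefixes: one dict lookup, then prefix tests over only that method's entries (the exact-match check is subsumed by startswith).
import Mathlib
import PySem

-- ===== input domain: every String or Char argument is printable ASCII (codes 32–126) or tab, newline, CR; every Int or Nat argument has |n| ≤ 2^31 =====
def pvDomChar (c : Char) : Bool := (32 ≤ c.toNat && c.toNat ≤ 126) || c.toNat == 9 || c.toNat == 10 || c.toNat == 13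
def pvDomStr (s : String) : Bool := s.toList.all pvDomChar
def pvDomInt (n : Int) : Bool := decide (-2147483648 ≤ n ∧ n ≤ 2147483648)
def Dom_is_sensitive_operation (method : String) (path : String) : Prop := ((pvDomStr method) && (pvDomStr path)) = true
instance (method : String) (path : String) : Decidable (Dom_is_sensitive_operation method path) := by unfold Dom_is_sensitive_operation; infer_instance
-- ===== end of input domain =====

-- B replaces A's exact-match set test + split-every-entry scan by a precomputed method-keyed dict
-- of path prefixes (one lookup, then startswith over that method's prefixes); objective: simpler.

-- ===== PORT A =====
-- the SENSITIVE_OPERATIONS set literal, in source order (membership/scan results are order-independent)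
def pvSensitiveOps : List String :=
  ["POST /api/voice/clone", "DELETE /api/profiles", "DELETE /api/projects",
   "POST /api/training/start", "POST /api/training/export", "POST /api/training/import"]

def pvSensitiveSet : PySem.Set (List Char) := PySem.Set.ofList (pvSensitiveOps.map String.toList)

-- the 'for sensitive_op in SENSITIVE_OPERATIONS' loop; u = method.upper() (computed once, same value
-- Python recomputes each iteration), p = path; the '_' branch is unreachable: every entry contains a
-- space, so sensitive_op.split(" ", 1) always unpacks into exactly two parts
def pvLoopA (u p : List Char) : List String → Bool
  | [] => false
  | op :: rest =>
    match PySem.Chars.splitOnMax op.toList " ".toList 1 with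
    | [opm, opp] =>
      if u == opm && PySem.Chars.startswith p opp then true else pvLoopA u p rest
    | _ => pvLoopA u p rest

def is_sensitive_operation (method : String) (path : String) : Bool :=
  -- operation = f"{method.upper()} {path}"
  let operation : List Char := PySem.Chars.upper method.toList ++ ' ' :: path.toList
  if PySem.Set.contains pvSensitiveSet operation then true
  else pvLoopA (PySem.Chars.upper method.toList) path.toList pvSensitiveOps

-- ===== PORT B =====
-- SENSITIVE_PREFIXES: method -> list of sensitive path prefixes
def pvPrefixTable : PySem.Dict (List Char) (List (List Char)) :=
  PySem.Dict.mk
    [("POST".toList, ["/api/voice/clone".toList, "/api/training/start".toList,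
                      "/api/training/export".toList, "/api/training/import".toList]),
     ("DELETE".toList, ["/api/profiles".toList, "/api/projects".toList])]

def is_sensitive_operation_alt (method : String) (path : String) : Bool :=
  match PySem.Dict.get? pvPrefixTable (PySem.Chars.upper method.toList) with
  | none => false
  | some ps => ps.any fun pre => PySem.Chars.startswith path.toList pre

-- ===== PRECONDITION & SPEC =====
def Spec_is_sensitive_operation (method : String) (path : String) (out : Bool) : Prop := out = is_sensitive_operation_alt method path
instance (method : String) (path : String) (out : Bool) : Decidable (Spec_is_sensitive_operation method path out) := by unfold Spec_is_sensitive_operation; infer_instance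

-- ===== CLAIM (what is proved, stated in full; the proofs are below) =====
def Claim_equal_is_sensitive_operation : Prop := ∀ (method : String) (path : String), Dom_is_sensitive_operation method path → Spec_is_sensitive_operation method path (is_sensitive_operation method path)

-- ===== LEMMAS AND PROOFS =====

-- splitting at a space is unambiguous when neither left part contains a space
lemma pv_space_split (u p x y : List Char) (hu : ' ' ∉ u) (hx : ' ' ∉ x)
    (h : u ++ ' ' :: p = x ++ ' ' :: y) : u = x ∧ p = y := by
  induction u generalizing x with
  | nil =>
    cases x with
    | nil => exact ⟨rfl, by simpa using h⟩
    | cons d x' =>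
      simp only [List.nil_append, List.cons_append, List.cons.injEq] at h
      obtain ⟨h1, -⟩ := h
      subst h1
      exact absurd (by simp) hx
  | cons c u' ih =>
    cases x with
    | nil =>
      simp only [List.cons_append, List.nil_append, List.cons.injEq] at h
      obtain ⟨h1, -⟩ := h
      subst h1
      exact absurd (by simp) hu
    | cons d x' =>
      simp only [List.cons_append, List.cons.injEq] at h
      obtain ⟨rfl, h2⟩ := h
      have hu' : ' ' ∉ u' := fun m => hu (List.mem_cons_of_mem _ m)
      have hx' : ' ' ∉ x' := fun m => hx (List.mem_cons_of_mem _ m)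
      obtain ⟨h3, h4⟩ := ih x' hu' hx' h2
      exact ⟨by rw [h3], h4⟩

lemma pv_concat_eq (u p x y : List Char) (hx : x.count ' ' = 0) (hy : y.count ' ' = 0) :
    u ++ ' ' :: p = x ++ ' ' :: y ↔ (u = x ∧ p = y) := by
  constructor
  · intro h
    have hc := congrArg (List.count ' ') h
    simp only [List.count_append, List.count_cons_self] at hc
    have hcu : u.count ' ' = 0 := by omega
    exact pv_space_split u p x y (by rw [← List.count_eq_zero]; exact hcu)
      (by rw [← List.count_eq_zero]; exact hx) h
  · rintro ⟨rfl, rfl⟩; rfl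

lemma pv_e1 (u p : List Char) : u ++ ' ' :: p = "POST /api/voice/clone".toList ↔
    (u = "POST".toList ∧ p = "/api/voice/clone".toList) := by
  rw [show ("POST /api/voice/clone".toList : List Char) = "POST".toList ++ ' ' :: "/api/voice/clone".toList from rfl]
  exact pv_concat_eq _ _ _ _ (by decide) (by decide)

lemma pv_e2 (u p : List Char) : u ++ ' ' :: p = "DELETE /api/profiles".toList ↔
    (u = "DELETE".toList ∧ p = "/api/profiles".toList) := by
  rw [show ("DELETE /api/profiles".toList : List Char) = "DELETE".toList ++ ' ' :: "/api/profiles".toList from rfl]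
  exact pv_concat_eq _ _ _ _ (by decide) (by decide)

lemma pv_e3 (u p : List Char) : u ++ ' ' :: p = "DELETE /api/projects".toList ↔
    (u = "DELETE".toList ∧ p = "/api/projects".toList) := by
  rw [show ("DELETE /api/projects".toList : List Char) = "DELETE".toList ++ ' ' :: "/api/projects".toList from rfl]
  exact pv_concat_eq _ _ _ _ (by decide) (by decide)

lemma pv_e4 (u p : List Char) : u ++ ' ' :: p = "POST /api/training/start".toList ↔
    (u = "POST".toList ∧ p = "/api/training/start".toList) := by
  rw [show ("POST /api/training/start".toList : List Char) = "POST".toList ++ ' ' :: "/api/training/start".toList from rfl]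
  exact pv_concat_eq _ _ _ _ (by decide) (by decide)

lemma pv_e5 (u p : List Char) : u ++ ' ' :: p = "POST /api/training/export".toList ↔
    (u = "POST".toList ∧ p = "/api/training/export".toList) := by
  rw [show ("POST /api/training/export".toList : List Char) = "POST".toList ++ ' ' :: "/api/training/export".toList from rfl]
  exact pv_concat_eq _ _ _ _ (by decide) (by decide)

lemma pv_e6 (u p : List Char) : u ++ ' ' :: p = "POST /api/training/import".toList ↔
    (u = "POST".toList ∧ p = "/api/training/import".toList) := by
  rw [show ("POST /api/training/import".toList : List Char) = "POST".toList ++ ' ' :: "/api/training/import".toList from rfl]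
  exact pv_concat_eq _ _ _ _ (by decide) (by decide)

-- membership in the set, decomposed
lemma pv_mem (u p : List Char) :
    PySem.Set.contains pvSensitiveSet (u ++ ' ' :: p) = true ↔
      ((u = "POST".toList ∧ p = "/api/voice/clone".toList) ∨
       (u = "DELETE".toList ∧ p = "/api/profiles".toList) ∨
       (u = "DELETE".toList ∧ p = "/api/projects".toList) ∨
       (u = "POST".toList ∧ p = "/api/training/start".toList) ∨
       (u = "POST".toList ∧ p = "/api/training/export".toList) ∨
       (u = "POST".toList ∧ p = "/api/training/import".toList)) := by
  simp only [pvSensitiveSet, PySem.Set.contains, List.contains_eq_mem, PySem.Set.mem_ofList,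
    decide_eq_true_eq, pvSensitiveOps, List.map_cons, List.map_nil, List.mem_cons,
    List.not_mem_nil, or_false]
  simp only [pv_e1, pv_e2, pv_e3, pv_e4, pv_e5, pv_e6]

lemma pv_s1 : PySem.Chars.splitOnMax ['P', 'O', 'S', 'T', ' ', '/', 'a', 'p', 'i', '/', 'v', 'o', 'i', 'c', 'e', '/', 'c', 'l', 'o', 'n', 'e'] [' '] 1 =
    [['P', 'O', 'S', 'T'], ['/', 'a', 'p', 'i', '/', 'v', 'o', 'i', 'c', 'e', '/', 'c', 'l', 'o', 'n', 'e']] := by decide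

lemma pv_s2 : PySem.Chars.splitOnMax ['D', 'E', 'L', 'E', 'T', 'E', ' ', '/', 'a', 'p', 'i', '/', 'p', 'r', 'o', 'f', 'i', 'l', 'e', 's'] [' '] 1 =
    [['D', 'E', 'L', 'E', 'T', 'E'], ['/', 'a', 'p', 'i', '/', 'p', 'r', 'o', 'f', 'i', 'l', 'e', 's']] := by decide

lemma pv_s3 : PySem.Chars.splitOnMax ['D', 'E', 'L', 'E', 'T', 'E', ' ', '/', 'a', 'p', 'i', '/', 'p', 'r', 'o', 'j', 'e', 'c', 't', 's'] [' '] 1 =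
    [['D', 'E', 'L', 'E', 'T', 'E'], ['/', 'a', 'p', 'i', '/', 'p', 'r', 'o', 'j', 'e', 'c', 't', 's']] := by decide

lemma pv_s4 : PySem.Chars.splitOnMax ['P', 'O', 'S', 'T', ' ', '/', 'a', 'p', 'i', '/', 't', 'r', 'a', 'i', 'n', 'i', 'n', 'g', '/', 's', 't', 'a', 'r', 't'] [' '] 1 =
    [['P', 'O', 'S', 'T'], ['/', 'a', 'p', 'i', '/', 't', 'r', 'a', 'i', 'n', 'i', 'n', 'g', '/', 's', 't', 'a', 'r', 't']] := by decide

lemma pv_s5 : PySem.Chars.splitOnMax ['P', 'O', 'S', 'T', ' ', '/', 'a', 'p', 'i', '/', 't', 'r', 'a', 'i', 'n', 'i', 'n', 'g', '/', 'e', 'x', 'p', 'o', 'r', 't'] [' '] 1 =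
    [['P', 'O', 'S', 'T'], ['/', 'a', 'p', 'i', '/', 't', 'r', 'a', 'i', 'n', 'i', 'n', 'g', '/', 'e', 'x', 'p', 'o', 'r', 't']] := by decide

lemma pv_s6 : PySem.Chars.splitOnMax ['P', 'O', 'S', 'T', ' ', '/', 'a', 'p', 'i', '/', 't', 'r', 'a', 'i', 'n', 'i', 'n', 'g', '/', 'i', 'm', 'p', 'o', 'r', 't'] [' '] 1 =
    [['P', 'O', 'S', 'T'], ['/', 'a', 'p', 'i', '/', 't', 'r', 'a', 'i', 'n', 'i', 'n', 'g', '/', 'i', 'm', 'p', 'o', 'r', 't']] := by decide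

-- the dict lookup, by key
lemma pv_get_post : PySem.Dict.get? pvPrefixTable ['P', 'O', 'S', 'T'] =
    some [['/', 'a', 'p', 'i', '/', 'v', 'o', 'i', 'c', 'e', '/', 'c', 'l', 'o', 'n', 'e'],
          ['/', 'a', 'p', 'i', '/', 't', 'r', 'a', 'i', 'n', 'i', 'n', 'g', '/', 's', 't', 'a', 'r', 't'],
          ['/', 'a', 'p', 'i', '/', 't', 'r', 'a', 'i', 'n', 'i', 'n', 'g', '/', 'e', 'x', 'p', 'o', 'r', 't'],
          ['/', 'a', 'p', 'i', '/', 't', 'r', 'a', 'i', 'n', 'i', 'n', 'g', '/', 'i', 'm', 'p', 'o', 'r', 't']] := by decide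
lemma pv_get_delete : PySem.Dict.get? pvPrefixTable ['D', 'E', 'L', 'E', 'T', 'E'] =
    some [['/', 'a', 'p', 'i', '/', 'p', 'r', 'o', 'f', 'i', 'l', 'e', 's'], ['/', 'a', 'p', 'i', '/', 'p', 'r', 'o', 'j', 'e', 'c', 't', 's']] := by decide
lemma pv_get_none (u : List Char) (h1 : u ≠ "POST".toList) (h2 : u ≠ "DELETE".toList) :
    PySem.Dict.get? pvPrefixTable u = none := by
  have hb1 : (("POST".toList : List Char) == u) = false := beq_eq_false_iff_ne.mpr (fun h => h1 h.symm)
  have hb2 : (("DELETE".toList : List Char) == u) = false := beq_eq_false_iff_ne.mpr (fun h => h2 h.symm)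
  simp only [pvPrefixTable, PySem.Dict.get?_mk_cons, hb1, hb2, if_false, Bool.false_eq_true]
  rfl

-- the scan over all six entries, for each shape of u
lemma pv_loop_post (p : List Char) : pvLoopA ['P', 'O', 'S', 'T'] p pvSensitiveOps =
    (PySem.Chars.startswith p ['/', 'a', 'p', 'i', '/', 'v', 'o', 'i', 'c', 'e', '/', 'c', 'l', 'o', 'n', 'e'] ||
     (PySem.Chars.startswith p ['/', 'a', 'p', 'i', '/', 't', 'r', 'a', 'i', 'n', 'i', 'n', 'g', '/', 's', 't', 'a', 'r', 't'] ||
      (PySem.Chars.startswith p ['/', 'a', 'p', 'i', '/', 't', 'r', 'a', 'i', 'n', 'i', 'n', 'g', '/', 'e', 'x', 'p', 'o', 'r', 't'] ||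
       PySem.Chars.startswith p ['/', 'a', 'p', 'i', '/', 't', 'r', 'a', 'i', 'n', 'i', 'n', 'g', '/', 'i', 'm', 'p', 'o', 'r', 't']))) := by
  simp [pvSensitiveOps, pvLoopA, pv_s1, pv_s2, pv_s3, pv_s4, pv_s5, pv_s6, Bool.if_true_left]

lemma pv_loop_delete (p : List Char) : pvLoopA ['D', 'E', 'L', 'E', 'T', 'E'] p pvSensitiveOps =
    (PySem.Chars.startswith p ['/', 'a', 'p', 'i', '/', 'p', 'r', 'o', 'f', 'i', 'l', 'e', 's'] ||
     PySem.Chars.startswith p ['/', 'a', 'p', 'i', '/', 'p', 'r', 'o', 'j', 'e', 'c', 't', 's']) := by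
  simp [pvSensitiveOps, pvLoopA, pv_s1, pv_s2, pv_s3, pv_s4, pv_s5, pv_s6, Bool.if_true_left]

lemma pv_loop_none (u p : List Char) (h1 : u ≠ "POST".toList) (h2 : u ≠ "DELETE".toList) :
    pvLoopA u p pvSensitiveOps = false := by
  have hb1 : (u == (['P', 'O', 'S', 'T'] : List Char)) = false := beq_eq_false_iff_ne.mpr h1
  have hb2 : (u == (['D', 'E', 'L', 'E', 'T', 'E'] : List Char)) = false := beq_eq_false_iff_ne.mpr h2
  simp [pvSensitiveOps, pvLoopA, pv_s1, pv_s2, pv_s3, pv_s4, pv_s5, pv_s6, hb1, hb2]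

-- core equivalence, over the already-uppercased method u and the path p
lemma pv_core (u p : List Char) :
    (if PySem.Set.contains pvSensitiveSet (u ++ ' ' :: p) then true
     else pvLoopA u p pvSensitiveOps)
    = (match PySem.Dict.get? pvPrefixTable u with
       | none => false
       | some ps => ps.any fun pre => PySem.Chars.startswith p pre) := by
  by_cases hm : PySem.Set.contains pvSensitiveSet (u ++ ' ' :: p) = true
  · rw [if_pos hm]
    rcases (pv_mem u p).mp hm with ⟨rfl, rfl⟩ | ⟨rfl, rfl⟩ | ⟨rfl, rfl⟩ | ⟨rfl, rfl⟩ | ⟨rfl, rfl⟩ | ⟨rfl, rfl⟩ <;> decide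
  · rw [if_neg hm]
    by_cases hP : u = "POST".toList
    · subst hP
      rw [show ("POST".toList : List Char) = ['P', 'O', 'S', 'T'] from rfl, pv_loop_post, pv_get_post]
      simp
    · by_cases hD : u = "DELETE".toList
      · subst hD
        rw [show ("DELETE".toList : List Char) = ['D', 'E', 'L', 'E', 'T', 'E'] from rfl, pv_loop_delete, pv_get_delete]
        simp
      · rw [pv_loop_none u p hP hD, pv_get_none u hP hD]

-- ===== VERDICT (by name: the statement is the Claim_ definition above) =====
theorem is_sensitive_operation_spec : Claim_equal_is_sensitive_operation := by
  intro method path _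
  show is_sensitive_operation method path = is_sensitive_operation_alt method path
  exact pv_core (PySem.Chars.upper method.toList) path.toList
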